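-- pv_equiv track=rewrite | github.com/MelissaPerez09/Laboratorios-CC3071 | lexicalAnalyzer/LexicalAnalyzer.py | parse_special_characters
-- ===== SOURCE A (Python) =====
-- def parse_special_characters(regex):
--    i = 0
--    result = ''
--    while i < len(regex):
--        if i + 1 < len(regex) and regex[i] == '\\' and regex[i+1] in 'wnts':
--            result += regex[i:i+2]
--            i += 2
--        else:
--            result += regex[i]
--            i += 1
--    return result
-- ===== SOURCE B (Python) =====
-- def parse_special_characters(regex):
--     # The loop copies every character in order (the escape branch only changes
--     # how many characters are consumed per step), so the function is the identity.
--     return regex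
-- ===== Notes on version B (the rewrite author's own statement) =====
-- stated objective: simpler
-- what changed: Replaced the index-driven copy loop with the closed form `return regex`, since the loop always appends exactly the characters it consumes and so is the identity.
import Mathlib
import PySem

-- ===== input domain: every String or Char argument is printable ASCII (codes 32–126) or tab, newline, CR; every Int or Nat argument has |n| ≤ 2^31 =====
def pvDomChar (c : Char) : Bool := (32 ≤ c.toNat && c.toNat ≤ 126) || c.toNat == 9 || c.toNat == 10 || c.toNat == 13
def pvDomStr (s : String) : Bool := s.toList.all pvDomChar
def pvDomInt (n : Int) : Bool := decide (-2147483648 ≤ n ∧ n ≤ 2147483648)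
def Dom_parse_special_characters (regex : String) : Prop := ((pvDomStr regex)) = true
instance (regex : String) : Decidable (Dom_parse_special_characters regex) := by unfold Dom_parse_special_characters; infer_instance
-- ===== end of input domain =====

-- B is the closed form `return regex`: A's loop appends exactly the characters it consumes, so it is the identity. Objective: simpler.

-- ===== PORT A =====
-- A's while-loop over index i, transliterated as recursion on the suffix of the
-- character list starting at i, with `result` as the accumulator. The escape
-- branch fires when i+1 < len, regex[i] = '\' and regex[i+1] ∈ "wnts"; it
-- appends regex[i:i+2] and consumes two characters, else one.
def pvLoopA : List Char → List Char → List Char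
  | [], acc => acc
  | a :: b :: rest2, acc =>
    if a = '\\' ∧ (b = 'w' ∨ b = 'n' ∨ b = 't' ∨ b = 's') then
      pvLoopA rest2 (acc ++ [a, b])
    else
      pvLoopA (b :: rest2) (acc ++ [a])
  | [a], acc => pvLoopA [] (acc ++ [a])
termination_by cs _ => cs.length

def parse_special_characters (regex : String) : String :=
  String.ofList (pvLoopA regex.toList [])

-- ===== PORT B =====
def parse_special_characters_alt (regex : String) : String := regex

-- ===== PRECONDITION & SPEC =====
def Spec_parse_special_characters (regex : String) (out : String) : Prop := out = parse_special_characters_alt regex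
instance (regex : String) (out : String) : Decidable (Spec_parse_special_characters regex out) := by unfold Spec_parse_special_characters; infer_instance

-- ===== CLAIM (what is proved, stated in full; the proofs are below) =====
def Claim_equal_parse_special_characters : Prop := ∀ (regex : String), Dom_parse_special_characters regex → Spec_parse_special_characters regex (parse_special_characters regex)

-- ===== LEMMAS AND PROOFS =====
theorem pvLoopA_eq (cs acc : List Char) : pvLoopA cs acc = acc ++ cs := by
  induction cs, acc using pvLoopA.induct with
  | case1 acc' => simp [pvLoopA]
  | case2 a b rest2 acc' h ih =>
      rw [pvLoopA]; simp only [if_pos h]; rw [ih]; simp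
  | case3 a b rest2 acc' h ih =>
      rw [pvLoopA]; simp only [if_neg h]; rw [ih]; simp
  | case4 a acc' =>
      simp [pvLoopA]

-- ===== VERDICT (by name: the statement is the Claim_ definition above) =====
theorem parse_special_characters_spec : Claim_equal_parse_special_characters := by
  intro regex _
  unfold Spec_parse_special_characters parse_special_characters parse_special_characters_alt
  rw [pvLoopA_eq]
  simp [String.ofList]
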